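-- pv_equiv track=rewrite | github.com/CamilleBrett/SimulationTransmission | src/CRC.py | crc_encoding
-- ===== SOURCE A (Python) =====
-- def crc(input, state):
--     """
--     Pour l'entree et l'etat des registres donnes, retourne l'etat suivant et la sortie
--     d'un code convolutif ayant pour polynomes generateurs poly_1 et poly_2
--     """
--     poly_1 = [1, 1, 1]
--     poly_2=[1, 0, 1]
--     output = [(poly_1[0] & input) ^ (poly_1[1] & state[0]) ^ (poly_1[2] & state[1]), (poly_2[0] & input) ^
--               (poly_2[1] & state[0]) ^ (poly_2[2] & state[1])]
--     return output, [input, state[0]]  # output, new_state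
--
-- def crc_encoding(message):
--     """Encode le message suivant le code convolutif de polynomes generateurs poly_1 et poly_2"""
--     state = [0, 0] #etat initial de nos registres
--     coded_message = []
--     for i in message:
--         output, new_state = crc(i, state)
--         coded_message.append(output)
--         state = new_state
--     return coded_message
-- ===== SOURCE B (Python) =====
-- def crc_encoding(message):
--     padded = [0, 0] + list(message)
--     return [[(a & 1) ^ (b & 1) ^ (c & 1), (a & 1) ^ (c & 1)]
--             for c, b, a in zip(padded, padded[1:], padded[2:])]
-- ===== Notes on version B (the rewrite author's own statement) =====
-- stated objective: simpler
-- what changed: B drops the stateful shift-register helper entirely: it prepends two zero bits and emits each coded pair by xoring the low bits of a sliding three-element window (zip of the padded list with its two shifts), instead of threading a register state through a loop.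
import Mathlib
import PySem

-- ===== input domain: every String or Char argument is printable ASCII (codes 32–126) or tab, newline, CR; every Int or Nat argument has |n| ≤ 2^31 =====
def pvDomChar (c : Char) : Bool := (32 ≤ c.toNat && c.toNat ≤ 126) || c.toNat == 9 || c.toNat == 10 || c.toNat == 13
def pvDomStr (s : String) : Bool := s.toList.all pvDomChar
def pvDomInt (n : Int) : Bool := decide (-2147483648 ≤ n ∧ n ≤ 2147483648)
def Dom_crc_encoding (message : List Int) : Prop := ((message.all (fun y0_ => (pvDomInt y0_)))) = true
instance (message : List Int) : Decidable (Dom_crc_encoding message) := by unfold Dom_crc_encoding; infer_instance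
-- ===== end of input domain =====

-- B replaces A's stateful register loop by a windowed pass over the zero-padded list; objective: simpler.

-- ===== PORT A =====
-- helper crc(input, state): state is always the two-element register list [s0, s1]
def crc (input : Int) (state : Int × Int) : List Int × (Int × Int) :=
  ([PySem.Int.bxor (PySem.Int.bxor (PySem.Int.band 1 input) (PySem.Int.band 1 state.1)) (PySem.Int.band 1 state.2),
    PySem.Int.bxor (PySem.Int.bxor (PySem.Int.band 1 input) (PySem.Int.band 0 state.1)) (PySem.Int.band 1 state.2)],
   (input, state.1))

-- the for-loop of crc_encoding as structural recursion over the remaining message and the register state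
def crcLoop (message : List Int) (state : Int × Int) : List (List Int) :=
  match message with
  | [] => []
  | i :: rest =>
    let r := crc i state
    r.1 :: crcLoop rest r.2

def crc_encoding (message : List Int) : List (List Int) :=
  crcLoop message (0, 0)

-- ===== PORT B =====
def crc_encoding_alt (message : List Int) : List (List Int) :=
  let padded : List Int := 0 :: 0 :: message
  List.zipWith3
    (fun c b a =>
      [PySem.Int.bxor (PySem.Int.bxor (PySem.Int.band a 1) (PySem.Int.band b 1)) (PySem.Int.band c 1),
       PySem.Int.bxor (PySem.Int.band a 1) (PySem.Int.band c 1)])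
    padded (padded.drop 1) (padded.drop 2)

-- ===== PRECONDITION & SPEC =====
def Spec_crc_encoding (message : List Int) (out : List (List Int)) : Prop := out = crc_encoding_alt message
instance (message : List Int) (out : List (List Int)) : Decidable (Spec_crc_encoding message out) := by unfold Spec_crc_encoding; infer_instance

-- ===== CLAIM (what is proved, stated in full; the proofs are below) =====
def Claim_equal_crc_encoding : Prop := ∀ (message : List Int), Dom_crc_encoding message → Spec_crc_encoding message (crc_encoding message)

-- ===== LEMMAS AND PROOFS =====

-- A's loop from register (a, b) equals B's windowed zip over b :: a :: message
theorem crcLoop_eq_zip (message : List Int) (a b : Int) :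
    crcLoop message (a, b) =
      List.zipWith3
        (fun c b' a' =>
          [PySem.Int.bxor (PySem.Int.bxor (PySem.Int.band a' 1) (PySem.Int.band b' 1)) (PySem.Int.band c 1),
           PySem.Int.bxor (PySem.Int.band a' 1) (PySem.Int.band c 1)])
        (b :: a :: message) (a :: message) message := by
  induction message generalizing a b with
  | nil => rfl
  | cons i rest ih =>
    simp only [crcLoop, crc, List.zipWith3, ih]
    simp only [PySem.Int.band_comm 1, PySem.Int.band_comm 0, PySem.Int.band_zero,
      PySem.Int.bxor_zero]

-- ===== VERDICT (by name: the statement is the Claim_ definition above) =====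
theorem crc_encoding_spec : Claim_equal_crc_encoding := by
  intro message _
  unfold Spec_crc_encoding crc_encoding crc_encoding_alt
  exact crcLoop_eq_zip message 0 0
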